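-- pv_equiv track=rewrite | github.com/Ely-S/PatientPunk | Scrapers/demographic_extraction/llm_extract.py | collect_texts_from_user
-- ===== SOURCE A (Python) =====
-- HEALTH_SUBREDDITS = {
--     "covidlonghaulers", "longcovid", "cfs", "chronicfatigue",
--     "mecfs", "pots", "dysautonomia", "mcas", "fibromyalgia",
--     "ehlersdanlos", "lupus", "multiplesclerosis", "rheumatoidarthritis",
--     "crohnsdisease", "ulcerativecolitis", "hashimotos", "lyme",
--     "sarcoidosis", "interstitialcystitis", "endometriosis", "pcos",
--     "chronicpain", "chronicillness", "invisibleillness", "spoonie",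
--     "autoimmune", "smallfiberneuropathy", "vaccinelonghauler",
--     "longcovidwarriors", "postcovidrecovery",
-- }
--
-- def collect_texts_from_user(user_data: dict) -> list[str]:
--     """Collect texts, health-subreddit posts first so truncation keeps the best content."""
--     health_texts = []
--     other_texts = []
--
--     for post in user_data.get("posts", []):
--         sub = post.get("subreddit", "").lower()
--         bucket = health_texts if sub in HEALTH_SUBREDDITS else other_texts
--         if post.get("title"):
--             bucket.append(post["title"])
--         if post.get("body"):
--             bucket.append(post["body"])
--
--     for comment in user_data.get("comments", []):
--         sub = comment.get("subreddit", "").lower()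
--         bucket = health_texts if sub in HEALTH_SUBREDDITS else other_texts
--         if comment.get("body"):
--             bucket.append(comment["body"])
--
--     return health_texts + other_texts
-- ===== SOURCE B (Python) =====
-- HEALTH_SUBREDDITS = {
--     "covidlonghaulers", "longcovid", "cfs", "chronicfatigue",
--     "mecfs", "pots", "dysautonomia", "mcas", "fibromyalgia",
--     "ehlersdanlos", "lupus", "multiplesclerosis", "rheumatoidarthritis",
--     "crohnsdisease", "ulcerativecolitis", "hashimotos", "lyme",
--     "sarcoidosis", "interstitialcystitis", "endometriosis", "pcos",
--     "chronicpain", "chronicillness", "invisibleillness", "spoonie",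
--     "autoimmune", "smallfiberneuropathy", "vaccinelonghauler",
--     "longcovidwarriors", "postcovidrecovery",
-- }
--
--
-- def collect_texts_from_user(user_data: dict) -> list[str]:
--     """Collect texts, health-subreddit content first, via one tagged stream + a stable sort."""
--     items = []
--     for kind, fields in (("posts", ("title", "body")), ("comments", ("body",))):
--         for entry in user_data.get(kind, []):
--             is_health = entry.get("subreddit", "").lower() in HEALTH_SUBREDDITS
--             items.extend((entry[f], is_health) for f in fields if entry.get(f))
--     return [text for text, _ in sorted(items, key=lambda it: 0 if it[1] else 1)]
-- ===== Notes on version B (the rewrite author's own statement) =====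
-- stated objective: alternative
-- what changed: Replaces A's two bucket lists (filled by two separate loops and concatenated) with a single pass that tags every kept text with its health flag and one stable sort that moves health-tagged items to the front while preserving intra-group order.
import Mathlib
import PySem

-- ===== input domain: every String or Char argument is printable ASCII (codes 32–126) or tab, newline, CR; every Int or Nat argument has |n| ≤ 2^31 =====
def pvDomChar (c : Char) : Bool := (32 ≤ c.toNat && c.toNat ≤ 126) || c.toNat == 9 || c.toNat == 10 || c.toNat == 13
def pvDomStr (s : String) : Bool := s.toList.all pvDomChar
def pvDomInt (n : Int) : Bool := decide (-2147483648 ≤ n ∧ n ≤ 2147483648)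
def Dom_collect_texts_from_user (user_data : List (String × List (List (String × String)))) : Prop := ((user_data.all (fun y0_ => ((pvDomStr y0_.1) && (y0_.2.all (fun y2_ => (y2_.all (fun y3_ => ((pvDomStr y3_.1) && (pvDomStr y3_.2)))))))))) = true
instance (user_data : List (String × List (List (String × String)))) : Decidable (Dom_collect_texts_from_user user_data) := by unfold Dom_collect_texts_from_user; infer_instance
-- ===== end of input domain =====

-- B replaces A's two bucket lists with one tagged stream plus a stable sort (alternative decomposition, same results).


-- shared constant: the HEALTH_SUBREDDITS set
def pvHealthSubs : List String :=
  ["covidlonghaulers", "longcovid", "cfs", "chronicfatigue",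
   "mecfs", "pots", "dysautonomia", "mcas", "fibromyalgia",
   "ehlersdanlos", "lupus", "multiplesclerosis", "rheumatoidarthritis",
   "crohnsdisease", "ulcerativecolitis", "hashimotos", "lyme",
   "sarcoidosis", "interstitialcystitis", "endometriosis", "pcos",
   "chronicpain", "chronicillness", "invisibleillness", "spoonie",
   "autoimmune", "smallfiberneuropathy", "vaccinelonghauler",
   "longcovidwarriors", "postcovidrecovery"]

-- ===== PORT A =====
-- loop body for a post: pick the bucket by subreddit, append truthy title then truthy body
def pvStepPost (acc : List String × List String) (post : List (String × String)) :
    List String × List String :=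
  let sub := PySem.Str.lower (PySem.Dict.getD (PySem.Dict.mk post) "subreddit" "")
  let isH := pvHealthSubs.contains sub
  let acc :=
    match PySem.Dict.get? (PySem.Dict.mk post) "title" with
    | some t => if t ≠ "" then (if isH then (acc.1 ++ [t], acc.2) else (acc.1, acc.2 ++ [t])) else acc
    | none => acc
  match PySem.Dict.get? (PySem.Dict.mk post) "body" with
  | some b => if b ≠ "" then (if isH then (acc.1 ++ [b], acc.2) else (acc.1, acc.2 ++ [b])) else acc
  | none => acc

-- loop body for a comment: same bucket choice, truthy body only
def pvStepComment (acc : List String × List String) (c : List (String × String)) :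
    List String × List String :=
  let sub := PySem.Str.lower (PySem.Dict.getD (PySem.Dict.mk c) "subreddit" "")
  let isH := pvHealthSubs.contains sub
  match PySem.Dict.get? (PySem.Dict.mk c) "body" with
  | some b => if b ≠ "" then (if isH then (acc.1 ++ [b], acc.2) else (acc.1, acc.2 ++ [b])) else acc
  | none => acc

def collect_texts_from_user (user_data : List (String × List (List (String × String)))) :
    List String :=
  let acc := (PySem.Dict.getD (PySem.Dict.mk user_data) "posts" []).foldl pvStepPost ([], [])
  let acc := (PySem.Dict.getD (PySem.Dict.mk user_data) "comments" []).foldl pvStepComment acc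
  acc.1 ++ acc.2

-- ===== PORT B =====
-- entry.get(f) is truthy: the key is present with a non-empty value
def pvTruthy (e : List (String × String)) (f : String) : Bool :=
  match PySem.Dict.get? (PySem.Dict.mk e) f with
  | some t => t ≠ ""
  | none => false

-- (entry[f], is_health) for f in fields if entry.get(f)
def pvTagEntry (fields : List String) (e : List (String × String)) : List (String × Bool) :=
  let isH := pvHealthSubs.contains (PySem.Str.lower (PySem.Dict.getD (PySem.Dict.mk e) "subreddit" ""))
  (fields.filter (fun f => pvTruthy e f)).map (fun f => (PySem.Dict.getD (PySem.Dict.mk e) f "", isH))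

def collect_texts_from_user_alt (user_data : List (String × List (List (String × String)))) :
    List String :=
  let items :=
    ([("posts", ["title", "body"]), ("comments", ["body"])] :
        List (String × List String)).foldl
      (fun items kf =>
        (PySem.Dict.getD (PySem.Dict.mk user_data) kf.1 []).foldl
          (fun items e => items ++ pvTagEntry kf.2 e) items)
      []
  (PySem.List.sorted items (fun it => if it.2 then (0 : Int) else 1)).map Prod.fst

-- ===== PRECONDITION & SPEC =====
-- Pre_ excludes association-list inputs that duplicate one of the dict keys the function reads
-- ("posts"/"comments" in user_data, "subreddit"/"title"/"body" in an entry): no Python dict can contain a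
-- duplicate key, and on such lists Python keeps the LAST value where the assoc-list convention reads the
-- FIRST, so such a list does not faithfully represent any input A can actually receive.
def Pre_collect_texts_from_user (user_data : List (String × List (List (String × String)))) : Prop :=
  user_data.countP (fun kv => kv.1 == "posts") ≤ 1 ∧
  user_data.countP (fun kv => kv.1 == "comments") ≤ 1 ∧
  ∀ kv ∈ user_data, ∀ e ∈ kv.2,
    e.countP (fun p => p.1 == "subreddit") ≤ 1 ∧
    e.countP (fun p => p.1 == "title") ≤ 1 ∧
    e.countP (fun p => p.1 == "body") ≤ 1
instance (user_data : List (String × List (List (String × String)))) : Decidable (Pre_collect_texts_from_user user_data) := by unfold Pre_collect_texts_from_user; infer_instance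

def pvWitness_collect_texts_from_user : (List (String × List (List (String × String)))) :=
  [("posts", [[("subreddit", "cfs"), ("title", "so tired"), ("body", "all day")],
              [("subreddit", "funny"), ("title", "lol"), ("body", "")]]),
   ("comments", [[("subreddit", "POTS"), ("body", "same here")],
                 [("subreddit", "news"), ("body", "meh")],
                 [("subreddit", "lupus"), ("body", "")]])]

def Spec_collect_texts_from_user (user_data : List (String × List (List (String × String)))) (out : List String) : Prop := out = collect_texts_from_user_alt user_data
instance (user_data : List (String × List (List (String × String)))) (out : List String) : Decidable (Spec_collect_texts_from_user user_data out) := by unfold Spec_collect_texts_from_user; infer_instance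

-- ===== CLAIM (what is proved, stated in full; the proofs are below) =====
def Claim_equal_collect_texts_from_user : Prop := ∀ (user_data : List (String × List (List (String × String)))), Dom_collect_texts_from_user user_data → Pre_collect_texts_from_user user_data → Spec_collect_texts_from_user user_data (collect_texts_from_user user_data)

-- ===== LEMMAS AND PROOFS =====

-- inserting a tagged item into a partitioned list keeps the partition, appending at its group's end
theorem pv_insert_partition (x : String × Bool) (h o : List (String × Bool))
    (hh : ∀ y ∈ h, y.2 = true) (ho : ∀ y ∈ o, y.2 = false) :
    PySem.List.insertBy
      (fun a b => decide ((if a.2 then (0 : Int) else 1) < (if b.2 then (0 : Int) else 1))) x (h ++ o)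
      = if x.2 then (h ++ [x]) ++ o else h ++ (o ++ [x]) := by
  induction h with
  | nil =>
    simp only [List.nil_append]
    induction o with
    | nil => simp [PySem.List.insertBy]
    | cons y ys ih =>
      have hy : y.2 = false := ho y (by simp)
      have hrec := ih (fun z hz => ho z (by simp [hz]))
      cases hx : x.2 <;> simp only [hx] at hrec ⊢ <;>
        simp [PySem.List.insertBy, hx, hy, hrec]
  | cons y ys ih =>
    have hy : y.2 = true := hh y (by simp)
    have hrec := ih (fun z hz => hh z (by simp [hz]))
    cases hx : x.2 <;> simp only [hx] at hrec ⊢ <;>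
      simp [PySem.List.insertBy, hx, hy, hrec]

-- the stable sort by the 0/1 key is exactly "health items first, both groups in stream order"
theorem pv_sorted_partition (items : List (String × Bool)) :
    PySem.List.sorted items (fun it => if it.2 then (0 : Int) else 1)
      = items.filter (fun it => it.2) ++ items.filter (fun it => !it.2) := by
  rw [PySem.List.sorted_eq_foldl_insertBy]
  suffices H : ∀ (l : List (String × Bool)) (h o : List (String × Bool)),
      (∀ y ∈ h, y.2 = true) → (∀ y ∈ o, y.2 = false) →
      l.foldl (fun acc x => PySem.List.insertBy
        (fun a b => decide ((if a.2 then (0 : Int) else 1) < (if b.2 then (0 : Int) else 1))) x acc)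
        (h ++ o)
      = (h ++ l.filter (fun it => it.2)) ++ (o ++ l.filter (fun it => !it.2)) by
    have := H items [] [] (by simp) (by simp)
    simpa using this
  intro l
  induction l with
  | nil => intro h o _ _; simp
  | cons x xs ih =>
    intro h o hh ho
    simp only [List.foldl_cons]
    rw [pv_insert_partition x h o hh ho]
    cases hx : x.2
    · rw [if_neg (by simp)]
      rw [ih h (o ++ [x]) hh (by intro y hy; rcases List.mem_append.1 hy with hy | hy
                                 · exact ho y hy
                                 · simp at hy; simp [hy, hx])]
      simp [hx]
    · rw [if_pos (by simp)]
      rw [ih (h ++ [x]) o (by intro y hy; rcases List.mem_append.1 hy with hy | hy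
                              · exact hh y hy
                              · simp at hy; simp [hy, hx]) ho]
      simp [hx]

-- one post step of A appends exactly the map/filter of that post's tagged texts to each bucket
theorem pv_stepPost_eq (acc : List String × List String) (post : List (String × String)) :
    pvStepPost acc post =
      (acc.1 ++ ((pvTagEntry ["title", "body"] post).filter (fun it => it.2)).map Prod.fst,
       acc.2 ++ ((pvTagEntry ["title", "body"] post).filter (fun it => !it.2)).map Prod.fst) := by
  simp only [pvStepPost, pvTagEntry, pvTruthy]
  generalize pvHealthSubs.contains (PySem.Str.lower (PySem.Dict.getD (PySem.Dict.mk post) "subreddit" "")) = isH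
  cases ht : PySem.Dict.get? (PySem.Dict.mk post) "title" with
  | none =>
    cases hb : PySem.Dict.get? (PySem.Dict.mk post) "body" with
    | none => cases isH <;> simp [ht, hb, List.filter]
    | some b =>
      by_cases hbe : b = "" <;> cases isH <;>
        simp [ht, hb, hbe, List.filter, PySem.Dict.getD_eq_get?_getD]
  | some t =>
    cases hb : PySem.Dict.get? (PySem.Dict.mk post) "body" with
    | none =>
      by_cases hte : t = "" <;> cases isH <;>
        simp [ht, hb, hte, List.filter, PySem.Dict.getD_eq_get?_getD]
    | some b =>
      by_cases hte : t = "" <;> by_cases hbe : b = "" <;> cases isH <;>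
        simp [ht, hb, hte, hbe, List.filter, PySem.Dict.getD_eq_get?_getD]

-- one comment step of A, same characterisation with fields = ["body"]
theorem pv_stepComment_eq (acc : List String × List String) (c : List (String × String)) :
    pvStepComment acc c =
      (acc.1 ++ ((pvTagEntry ["body"] c).filter (fun it => it.2)).map Prod.fst,
       acc.2 ++ ((pvTagEntry ["body"] c).filter (fun it => !it.2)).map Prod.fst) := by
  simp only [pvStepComment, pvTagEntry, pvTruthy]
  generalize pvHealthSubs.contains (PySem.Str.lower (PySem.Dict.getD (PySem.Dict.mk c) "subreddit" "")) = isH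
  cases hb : PySem.Dict.get? (PySem.Dict.mk c) "body" with
  | none => cases isH <;> simp [hb, List.filter]
  | some b =>
    by_cases hbe : b = "" <;> cases isH <;>
      simp [hb, hbe, List.filter, PySem.Dict.getD_eq_get?_getD]

-- folding a step of that shape accumulates the map/filter of the flatMap of tagged entries
theorem pv_foldl_step (fields : List String)
    (step : (List String × List String) → List (String × String) → List String × List String)
    (hstep : ∀ acc e, step acc e =
      (acc.1 ++ ((pvTagEntry fields e).filter (fun it => it.2)).map Prod.fst,
       acc.2 ++ ((pvTagEntry fields e).filter (fun it => !it.2)).map Prod.fst)) :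
    ∀ (l : List (List (String × String))) (h o : List String),
      l.foldl step (h, o) =
        (h ++ ((l.flatMap (pvTagEntry fields)).filter (fun it => it.2)).map Prod.fst,
         o ++ ((l.flatMap (pvTagEntry fields)).filter (fun it => !it.2)).map Prod.fst) := by
  intro l
  induction l with
  | nil => intro h o; simp
  | cons e es ih =>
    intro h o
    simp only [List.foldl_cons, hstep]
    rw [ih]
    simp [List.filter_append, List.map_append]

-- ===== VERDICT (by name: the statement is the Claim_ definition above) =====
theorem collect_texts_from_user_spec : Claim_equal_collect_texts_from_user := by
  intro user_data _ _
  unfold Spec_collect_texts_from_user collect_texts_from_user collect_texts_from_user_alt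
  simp only [List.foldl_cons, List.foldl_nil]
  rw [PySem.List.foldl_append_eq_flatMap, PySem.List.foldl_append_eq_flatMap]
  rw [pv_foldl_step ["title", "body"] pvStepPost pv_stepPost_eq,
      pv_foldl_step ["body"] pvStepComment pv_stepComment_eq]
  rw [pv_sorted_partition]
  simp [List.filter_append, List.map_append]
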